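-- pv_equiv track=rewrite | github.com/intermountainneuroimaging/fsl-topup | fw_gear_fsl_topup/main.py | locate_fieldmap_pairs
-- ===== SOURCE A (Python) =====
-- def locate_fieldmap_pairs(fmaps):
--     # first remove the "dir" component - then look for label duplicates
--     fmaps_stripped = ["_".join([x for x in s.split("_") if "dir" not in x]) for s in fmaps]
--
--     # custom function
--     def itemgetter(a, b): return [a[i] for i in b]
--
--     pairs=[]
--     for tmpl in sorted(set(fmaps_stripped)):
--         if fmaps_stripped.count(tmpl) == 2:
--             # this is a good match - return the full name
--             idxs = [i for i, x in enumerate(fmaps_stripped) if x == tmpl]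
--             match = itemgetter(fmaps,idxs)
--             pairs.append(match)
--
--     return pairs
-- ===== SOURCE B (Python) =====
-- from itertools import groupby
--
--
-- def locate_fieldmap_pairs(fmaps):
--     def strip(s):
--         return "_".join(x for x in s.split("_") if "dir" not in x)
--
--     # tag each name with its dir-stripped label, then stable-sort by label only
--     tagged = sorted([(strip(s), s) for s in fmaps], key=lambda p: p[0])
--
--     pairs = []
--     for _, grp in groupby(tagged, key=lambda p: p[0]):
--         names = [name for _, name in grp]
--         if len(names) == 2:
--             pairs.append(names)
--     return pairs
-- ===== Notes on version B (the rewrite author's own statement) =====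
-- stated objective: faster
-- what changed: Replaces A's per-template rescans of the stripped list (count, enumerate-filter for indices, itemgetter) with one stable sort of (stripped_label, name) pairs by label followed by a single itertools.groupby pass keeping runs of length exactly 2.
import Mathlib
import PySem

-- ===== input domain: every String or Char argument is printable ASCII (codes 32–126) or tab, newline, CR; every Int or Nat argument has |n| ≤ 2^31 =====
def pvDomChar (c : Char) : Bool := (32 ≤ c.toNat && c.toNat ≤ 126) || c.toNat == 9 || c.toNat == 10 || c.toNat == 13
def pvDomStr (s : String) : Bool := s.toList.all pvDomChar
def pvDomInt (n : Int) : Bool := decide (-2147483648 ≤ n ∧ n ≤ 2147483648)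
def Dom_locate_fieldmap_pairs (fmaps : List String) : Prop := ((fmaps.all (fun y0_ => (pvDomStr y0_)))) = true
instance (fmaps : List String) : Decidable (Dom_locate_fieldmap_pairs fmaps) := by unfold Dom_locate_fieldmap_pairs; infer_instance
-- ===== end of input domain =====

-- B replaces A's rescanning of the stripped-label list per template (count + enumerate + itemgetter)
-- by one stable sort of (label, name) pairs followed by a single groupby pass; objective: faster (measured).

-- ===== PORT A =====
-- strip: "_".join([x for x in s.split("_") if "dir" not in x])  (shared by both Pythons verbatim)
def pvStrip (s : String) : String :=
  PySem.Str.join "_" (((PySem.Str.split? s "_").getD []).filter (fun x => !(PySem.Str.isIn "dir" x)))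

def locate_fieldmap_pairs (fmaps : List String) : List (List String) :=
  let fmaps_stripped := fmaps.map pvStrip
  let pairs : List (List String) := []
  (PySem.List.sorted (PySem.Set.ofList fmaps_stripped) (fun x => x) false).foldl
    (fun pairs tmpl =>
      if PySem.List.count fmaps_stripped tmpl == 2 then
        let idxs := ((PySem.List.enumerate fmaps_stripped 0).filter (fun p => p.2 == tmpl)).map (fun p => p.1)
        let mtch := idxs.map (fun i => (PySem.List.pyGet? fmaps i).getD "")
        pairs ++ [mtch]
      else pairs) pairs

-- ===== PORT B =====
-- itertools.groupby over a list sorted by key: collect maximal runs of equal labels (names only)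
def pvRuns : List (String × String) → List (String × List String)
  | [] => []
  | (k, n) :: rest =>
    match pvRuns rest with
    | [] => [(k, [n])]
    | (k', g) :: t => if k = k' then (k, n :: g) :: t else (k, [n]) :: (k', g) :: t

def locate_fieldmap_pairs_alt (fmaps : List String) : List (List String) :=
  let tagged := fmaps.map (fun s => (pvStrip s, s))
  let srt := PySem.List.sorted tagged (fun p => p.1) false
  (pvRuns srt).foldl
    (fun pairs kg => if kg.2.length == 2 then pairs ++ [kg.2] else pairs) []

-- ===== PRECONDITION & SPEC =====
def Spec_locate_fieldmap_pairs (fmaps : List String) (out : List (List String)) : Prop := out = locate_fieldmap_pairs_alt fmaps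
instance (fmaps : List String) (out : List (List String)) : Decidable (Spec_locate_fieldmap_pairs fmaps out) := by unfold Spec_locate_fieldmap_pairs; infer_instance

-- ===== CLAIM (what is proved, stated in full; the proofs are below) =====
def Claim_equal_locate_fieldmap_pairs : Prop := ∀ (fmaps : List String), Dom_locate_fieldmap_pairs fmaps → Spec_locate_fieldmap_pairs fmaps (locate_fieldmap_pairs fmaps)

-- ===== LEMMAS AND PROOFS =====

-- A's index chase: enumerate+filter+itemgetter over a suffix recovers a plain filter.
theorem pv_idx_lemma (F : List String) (k : String) :
    ∀ (l : List String) (s : Int),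
      (∀ (j : Nat), j < l.length → PySem.List.pyGet? F (s + j) = l[j]?) →
      (((PySem.List.enumerate (l.map pvStrip) s).filter (fun p => p.2 == k)).map (fun p => p.1)).map
          (fun i => (PySem.List.pyGet? F i).getD "")
        = l.filter (fun n => pvStrip n == k) := by
  intro l
  induction l with
  | nil => intro s h; simp [PySem.List.enumerate_nil]
  | cons n t ih =>
    intro s h
    have h0 : PySem.List.pyGet? F s = some n := by
      have := h 0 (by simp)
      simpa using this
    have ht : ∀ (j : Nat), j < t.length → PySem.List.pyGet? F ((s + 1) + j) = t[j]? := by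
      intro j hj
      have := h (j + 1) (by simpa using Nat.succ_lt_succ hj)
      have e : s + ((j : Int) + 1) = (s + 1) + j := by ring
      simpa [e] using this
    by_cases hk : pvStrip n == k
    · simp [PySem.List.enumerate_cons, hk, h0, ih (s + 1) ht]
    · simp [PySem.List.enumerate_cons, hk, ih (s + 1) ht]

-- insertBy of x into a key-sorted list: the key-k elements gain x at the END iff key x = k.
theorem pv_filter_insertBy {α : Type} (key : α → String) (k : String) (x : α) :
    ∀ l : List α, l.Pairwise (fun a b => key a ≤ key b) →
      (PySem.List.insertBy (fun a b => decide (key a < key b)) x l).filter (fun a => key a == k)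
        = if key x == k then l.filter (fun a => key a == k) ++ [x]
          else l.filter (fun a => key a == k) := by
  intro l
  induction l with
  | nil => intro _; by_cases hx : key x == k <;> simp [PySem.List.insertBy, hx]
  | cons y ys ih =>
    intro hp
    rw [List.pairwise_cons] at hp
    have hcons : PySem.List.insertBy (fun a b => decide (key a < key b)) x (y :: ys)
        = if decide (key x < key y) then x :: y :: ys
          else y :: PySem.List.insertBy (fun a b => decide (key a < key b)) x ys := rfl
    rw [hcons]
    by_cases hb : key x < key y
    · by_cases hx : key x == k
      · have hxk : key x = k := by simpa using hx
        have hnil : (y :: ys).filter (fun a => key a == k) = [] := by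
          rw [List.filter_eq_nil_iff]
          intro a ha
          have hya : key y ≤ key a := by
            rcases List.mem_cons.mp ha with rfl | ha'
            · exact le_refl _
            · exact hp.1 a ha'
          have : k < key a := lt_of_lt_of_le (hxk ▸ hb) hya
          simp [ne_of_gt this]
        rw [if_pos (by simpa using hb)]
        simp [hx, hnil]
      · simp [hb, hx]
    · by_cases hy : key y == k
      · rw [if_neg (by simpa using hb)]
        rw [List.filter_cons_of_pos (by simpa using hy), ih hp.2]
        by_cases hx : key x == k <;> simp [hx, hy]
      · rw [if_neg (by simpa using hb)]
        rw [List.filter_cons_of_neg (by simpa using hy), ih hp.2]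
        by_cases hx : key x == k <;> simp [hx, hy]

-- STABILITY of Python's sort: the elements with a given key keep their original order.
theorem pv_filter_sorted {α : Type} (key : α → String) (k : String) (xs : List α) :
    (PySem.List.sorted xs key false).filter (fun a => key a == k)
      = xs.filter (fun a => key a == k) := by
  induction xs using List.reverseRecOn with
  | nil => simp [PySem.List.sorted_eq_foldl_insertBy]
  | append_singleton t x ih =>
    have hsrt : PySem.List.sorted (t ++ [x]) key false
        = PySem.List.insertBy (fun a b => decide (key a < key b)) x (PySem.List.sorted t key false) := by
      rw [PySem.List.sorted_eq_foldl_insertBy, PySem.List.sorted_eq_foldl_insertBy, List.foldl_append]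
      simp
    rw [hsrt, pv_filter_insertBy key k x _ (PySem.List.sorted_pairwise t key), List.filter_append]
    by_cases hx : key x == k <;> simp [hx, ih]

-- A key-sorted list is the concatenation of its key-groups, in key order.
theorem pv_partition {α : Type} (key : α → String) :
    ∀ (keys : List String) (l : List α), keys.Pairwise (· < ·) →
      l.Pairwise (fun a b => key a ≤ key b) → (∀ a ∈ l, key a ∈ keys) →
      l = keys.flatMap (fun k => l.filter (fun a => key a == k)) := by
  intro keys
  induction keys with
  | nil =>
    intro l _ _ hmem
    cases l with
    | nil => simp
    | cons a t => exact absurd (hmem a (by simp)) (by simp)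
  | cons k ks ih =>
    intro l hkp hlp hmem
    rw [List.pairwise_cons] at hkp
    -- split l into the k-prefix and the rest
    have hsplit : ∀ m : List α, m.Pairwise (fun a b => key a ≤ key b) → (∀ a ∈ m, key a ∈ k :: ks) →
        m = m.filter (fun a => key a == k) ++ m.filter (fun a => !(key a == k)) := by
      intro m
      induction m with
      | nil => simp
      | cons a t iht =>
        intro hmp hmm
        rw [List.pairwise_cons] at hmp
        by_cases ha : key a == k
        · simpa [ha] using iht hmp.2 (fun b hb => hmm b (by simp [hb]))
        · have hak : key a ∈ ks := by
            rcases List.mem_cons.mp (hmm a (by simp)) with h | h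
            · exact absurd (by simp [h]) ha
            · exact h
          have hka : k < key a := hkp.1 _ hak
          have hnone : ∀ b ∈ a :: t, ¬ (key b == k) := by
            intro b hb
            have hab : key a ≤ key b := by
              rcases List.mem_cons.mp hb with rfl | hb'
              · exact le_refl _
              · exact hmp.1 b hb'

            have : k < key b := lt_of_lt_of_le hka hab
            simp [ne_of_gt this]
          have h1 : (a :: t).filter (fun a => key a == k) = [] := by
            rw [List.filter_eq_nil_iff]; intro b hb; simpa using hnone b hb
          have h2 : (a :: t).filter (fun a => !(key a == k)) = a :: t := by
            rw [List.filter_eq_self]; intro b hb; simpa using hnone b hb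
          simp [h1, h2]
    have hme := hsplit l hlp hmem
    set l' := l.filter (fun a => !(key a == k)) with hl'
    have hrest : l' = ks.flatMap (fun k' => l'.filter (fun a => key a == k')) := by
      refine ih l' (hkp.2) (List.Pairwise.filter _ hlp) ?_
      intro a ha
      have hal : a ∈ l := List.mem_of_mem_filter ha
      have hne : ¬ (key a == k) := by
        have := List.of_mem_filter ha
        simpa using this
      rcases List.mem_cons.mp (hmem a hal) with h | h
      · exact absurd (by simp [h]) hne
      · exact h
    have hgrp : ∀ k' ∈ ks, l'.filter (fun a => key a == k') = l.filter (fun a => key a == k') := by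
      intro k' hk'
      have hkk : k ≠ k' := ne_of_lt (hkp.1 _ hk')
      rw [hl', List.filter_filter]
      apply List.filter_congr
      intro a _
      by_cases h : key a == k'
      · have : key a = k' := by simpa using h
        simp [this, hkk.symm]
      · simp [h]
    calc l = l.filter (fun a => key a == k) ++ l' := hme
      _ = l.filter (fun a => key a == k) ++ ks.flatMap (fun k' => l.filter (fun a => key a == k')) := by
            rw [← List.flatMap_congr hgrp, ← hrest]
      _ = (k :: ks).flatMap (fun k' => l.filter (fun a => key a == k')) := by
            rw [List.flatMap_cons]

-- pvRuns over a nonempty constant-key block followed by foreign keys.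
-- the head key of pvRuns comes from the list itself
theorem pv_runs_head (l : List (String × String)) (k : String) (g : List String)
    (t : List (String × List String)) (h : pvRuns l = (k, g) :: t) : ∃ q ∈ l, q.1 = k := by
  cases l with
  | nil => simp [pvRuns] at h
  | cons p rest =>
    obtain ⟨kp, n⟩ := p
    refine ⟨(kp, n), by simp, ?_⟩
    rw [pvRuns] at h
    cases hr : pvRuns rest with
    | nil =>
      rw [hr] at h
      exact congrArg Prod.fst (List.cons_eq_cons.mp h).1
    | cons q t' =>
      obtain ⟨k', g'⟩ := q
      rw [hr] at h
      dsimp only at h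
      by_cases hkk : kp = k'
      · rw [if_pos hkk] at h
        exact congrArg Prod.fst (List.cons_eq_cons.mp h).1
      · rw [if_neg hkk] at h
        exact congrArg Prod.fst (List.cons_eq_cons.mp h).1

theorem pv_runs_block (k : String) :
    ∀ (ns : List String) (rest : List (String × String)), ns ≠ [] → (∀ p ∈ rest, p.1 ≠ k) →
      pvRuns ((ns.map (fun n => (k, n))) ++ rest) = (k, ns) :: pvRuns rest := by
  intro ns
  induction ns with
  | nil => intro rest h _; exact absurd rfl h
  | cons n ns ih =>
    intro rest _ hrest
    cases ns with
    | nil =>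
      simp only [List.map_cons, List.map_nil, List.nil_append, List.cons_append, List.nil_append]
      rw [pvRuns]
      cases hr : pvRuns rest with
      | nil => rfl
      | cons q t =>
        obtain ⟨k', g'⟩ := q
        have : k ≠ k' := by
          obtain ⟨p, hp, hpk⟩ := pv_runs_head rest k' g' t hr
          exact fun he => (hrest p hp) (hpk.trans he.symm)
        simp [this]
    | cons n2 ns' =>
      have ihr := ih rest (by simp) hrest
      simp only [List.map_cons, List.cons_append] at ihr ⊢
      rw [pvRuns, ihr]
      simp

theorem pv_runs_flatMap (g : String → List String) :
    ∀ keys : List String, keys.Pairwise (· < ·) → (∀ k ∈ keys, g k ≠ []) →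
      pvRuns (keys.flatMap (fun k => (g k).map (fun n => (k, n)))) = keys.map (fun k => (k, g k)) := by
  intro keys
  induction keys with
  | nil => intro _ _; simp [pvRuns]
  | cons k ks ih =>
    intro hp hne
    rw [List.pairwise_cons] at hp
    rw [List.flatMap_cons]
    rw [pv_runs_block k (g k) _ (hne k (by simp)) ?_]
    · rw [ih hp.2 (fun k' hk' => hne k' (by simp [hk']))]; rfl
    · intro p hpm
      simp only [List.mem_flatMap, List.mem_map] at hpm
      obtain ⟨k', hk', n, _, rfl⟩ := hpm
      exact ne_of_gt (hp.1 k' hk')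

-- ===== VERDICT (by name: the statement is the Claim_ definition above) =====
theorem locate_fieldmap_pairs_spec : Claim_equal_locate_fieldmap_pairs := by
  intro fmaps _
  unfold Spec_locate_fieldmap_pairs
  -- shared notation
  set stripped := fmaps.map pvStrip with hstripped
  set keys := PySem.List.sorted (PySem.Set.ofList stripped) (fun x => x) false with hkeys
  set grp := fun k => fmaps.filter (fun n => pvStrip n == k) with hgrp
  set tagged := fmaps.map (fun s => (pvStrip s, s)) with htagged
  set srt := PySem.List.sorted tagged (fun p => p.1) false with hsrt
  -- ---- A to filtered-map form ----
  have hA : locate_fieldmap_pairs fmaps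
      = (keys.filter (fun k => PySem.List.count stripped k == 2)).map grp := by
    rw [locate_fieldmap_pairs]
    rw [PySem.List.foldl_append_if (fun tmpl => PySem.List.count stripped tmpl == 2)
      (fun tmpl => (((PySem.List.enumerate stripped 0).filter (fun p => p.2 == tmpl)).map (fun p => p.1)).map
        (fun i => (PySem.List.pyGet? fmaps i).getD ""))]
    rw [List.nil_append]
    apply List.map_congr_left
    intro k _
    rw [hstripped]
    apply pv_idx_lemma
    intro j hj
    rw [show (0 : Int) + j = ((j : Nat) : Int) by ring, PySem.List.pyGet?_natCast]
  -- ---- B to filtered-map form ----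
  have hcount : ∀ k, PySem.List.count stripped k = (grp k).length := by
    intro k
    rw [PySem.List.count_eq, hstripped, List.count_eq_countP, List.countP_map, hgrp,
      ← List.countP_eq_length_filter]
    rfl
  have hkplt : keys.Pairwise (· < ·) := by
    rw [hkeys]; exact PySem.List.sorted_ofList_pairwise_lt stripped
  have hsle : srt.Pairwise (fun a b => a.1 ≤ b.1) := by
    rw [hsrt]; exact PySem.List.sorted_pairwise tagged (fun p => p.1)
  have hmemkeys : ∀ p ∈ srt, p.1 ∈ keys := by
    intro p hp
    rw [hsrt, PySem.List.mem_sorted] at hp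
    rw [htagged] at hp
    obtain ⟨s, hsm, rfl⟩ := List.mem_map.mp hp
    rw [hkeys, PySem.List.mem_sorted, PySem.Set.mem_ofList, hstripped]
    exact List.mem_map_of_mem hsm
  have hfilter : ∀ k, srt.filter (fun p => p.1 == k) = (grp k).map (fun n => (k, n)) := by
    intro k
    rw [hsrt, pv_filter_sorted (fun p => p.1) k tagged, htagged, List.filter_map]
    have : (fmaps.filter ((fun p => p.1 == k) ∘ fun s => (pvStrip s, s)))
        = grp k := by rw [hgrp]; rfl
    rw [this]
    apply List.map_congr_left
    intro n hn
    have : pvStrip n = k := by simpa using (List.of_mem_filter hn)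
    rw [this]
  have hpart : srt = keys.flatMap (fun k => (grp k).map (fun n => (k, n))) := by
    have := pv_partition (fun p : String × String => p.1) keys srt hkplt hsle hmemkeys
    rw [this]
    exact List.flatMap_congr (fun k _ => hfilter k)
  have hne : ∀ k ∈ keys, grp k ≠ [] := by
    intro k hk hnil
    rw [hkeys, PySem.List.mem_sorted, PySem.Set.mem_ofList, hstripped] at hk
    obtain ⟨s, hsm, he⟩ := List.mem_map.mp hk
    have : s ∈ grp k := List.mem_filter.mpr ⟨hsm, by simp [he]⟩
    rw [hnil] at this
    simp at this
  have hruns : pvRuns srt = keys.map (fun k => (k, grp k)) := by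
    rw [hpart]
    exact pv_runs_flatMap grp keys hkplt hne
  have hB : locate_fieldmap_pairs_alt fmaps
      = (keys.filter (fun k => (grp k).length == 2)).map grp := by
    rw [locate_fieldmap_pairs_alt]
    rw [← htagged, ← hsrt]
    rw [PySem.List.foldl_append_if (fun kg : String × List String => kg.2.length == 2)
      (fun kg => kg.2)]
    rw [List.nil_append, hruns, List.filter_map, List.map_map]
    rfl
  rw [hA, hB]
  congr 1
  apply List.filter_congr
  intro k _
  rw [hcount k]
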